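-- pv_equiv track=rewrite | github.com/QuantamAIDevelopment/code_validator_agent | code_review_api.py | _extract_strengths
-- ===== SOURCE A (Python) =====
-- def _extract_strengths(issues, files):
--     """Extract code strengths"""
--     strengths = []
--     if len(issues) < 10:
--         strengths.append("Low issue count indicates good code quality")
--     if not any(i['type'] == 'SecurityIssue' for i in issues):
--         strengths.append("No security vulnerabilities detected")
--     if not any(i['type'] == 'SyntaxError' for i in issues):
--         strengths.append("All files have valid syntax")
--     if len(files) > 5:
--         strengths.append("Well-structured multi-file project")
--     return strengths or ["Code is functional"]
-- ===== SOURCE B (Python) =====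
-- _MESSAGES = (
--     "Low issue count indicates good code quality",
--     "No security vulnerabilities detected",
--     "All files have valid syntax",
--     "Well-structured multi-file project",
-- )
--
-- # All 16 possible answers, precomputed once: entry `mask` holds the messages
-- # whose bit (8,4,2,1) is set in mask, or the fallback when mask == 0.
-- _TABLE = [
--     [m for b, m in zip((8, 4, 2, 1), _MESSAGES) if mask & b]
--     or ["Code is functional"]
--     for mask in range(16)
-- ]
--
--
-- def _extract_strengths(issues, files):
--     """Extract code strengths: fold the issues once into two flags, form a
--     4-bit mask, and return a copy of the precomputed table row."""
--     sec = syn = False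
--     for i in issues:
--         t = i['type']
--         sec = sec or t == 'SecurityIssue'
--         syn = syn or t == 'SyntaxError'
--     mask = ((8 if len(issues) < 10 else 0)
--             | (4 if not sec else 0)
--             | (2 if not syn else 0)
--             | (1 if len(files) > 5 else 0))
--     return list(_TABLE[mask])
-- ===== Notes on version B (the rewrite author's own statement) =====
-- stated objective: alternative
-- what changed: B folds issues once into two boolean flags, packs the four conditions into a 4-bit mask and returns a row of a precomputed 16-entry lookup table of all possible answers, instead of A's interleaved any()-scans and conditional appends.
import Mathlib
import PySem

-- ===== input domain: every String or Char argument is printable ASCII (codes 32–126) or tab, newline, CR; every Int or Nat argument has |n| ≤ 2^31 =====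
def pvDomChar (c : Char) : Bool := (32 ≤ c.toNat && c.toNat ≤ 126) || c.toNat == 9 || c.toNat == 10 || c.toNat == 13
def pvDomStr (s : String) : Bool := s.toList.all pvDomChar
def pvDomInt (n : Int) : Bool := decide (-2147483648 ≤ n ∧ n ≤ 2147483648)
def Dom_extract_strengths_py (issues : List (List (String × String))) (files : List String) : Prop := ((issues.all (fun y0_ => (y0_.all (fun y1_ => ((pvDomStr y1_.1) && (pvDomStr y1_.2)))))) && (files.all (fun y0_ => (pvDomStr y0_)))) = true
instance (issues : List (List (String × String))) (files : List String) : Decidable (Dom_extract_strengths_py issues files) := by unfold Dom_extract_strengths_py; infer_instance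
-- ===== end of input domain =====

-- B folds issues once into two flags, packs the four conditions into a 4-bit mask and
-- returns a row of a precomputed 16-entry lookup table (alternative, not faster).

-- ===== PORT A =====
def extract_strengths_py (issues : List (List (String × String))) (files : List String) : List String :=
  let strengths : List String := []
  let strengths := if issues.length < 10 then strengths ++ ["Low issue count indicates good code quality"] else strengths
  let strengths := if !(issues.any fun i => List.lookup "type" i == some "SecurityIssue") then strengths ++ ["No security vulnerabilities detected"] else strengths
  let strengths := if !(issues.any fun i => List.lookup "type" i == some "SyntaxError") then strengths ++ ["All files have valid syntax"] else strengths
  let strengths := if files.length > 5 then strengths ++ ["Well-structured multi-file project"] else strengths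
  if strengths.isEmpty then ["Code is functional"] else strengths

-- ===== PORT B =====
def pvMessages : List String :=
  ["Low issue count indicates good code quality",
   "No security vulnerabilities detected",
   "All files have valid syntax",
   "Well-structured multi-file project"]

-- row `mask` of the precomputed table (the Python comprehension's body)
def pvRow (mask : Nat) : List String :=
  let r := (List.zip [8, 4, 2, 1] pvMessages).filterMap
    (fun p => if mask &&& p.1 ≠ 0 then some p.2 else none)
  if r.isEmpty then ["Code is functional"] else r

def pvTable : List (List String) := (List.range 16).map pvRow

-- i['type'] is a KeyError in Python when the key is missing; that input is outside
-- Pre_, so the total form '(List.lookup "type" i).getD ""' never reaches its default there.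
def extract_strengths_py_alt (issues : List (List (String × String))) (files : List String) : List String :=
  let flags := issues.foldl (fun (p : Bool × Bool) i =>
      let t := (List.lookup "type" i).getD ""
      (p.1 || t == "SecurityIssue", p.2 || t == "SyntaxError")) (false, false)
  let mask := (if issues.length < 10 then 8 else 0) |||
              (if !flags.1 then 4 else 0) |||
              (if !flags.2 then 2 else 0) |||
              (if files.length > 5 then 1 else 0)
  pvTable.getD mask []

-- ===== PRECONDITION & SPEC =====
-- Pre_ excludes issue dicts that lack the 'type' key: Python A raises KeyError there
-- (except when any()'s short-circuit accidentally stops first) and B raises KeyError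
-- on every such input.
def Pre_extract_strengths_py (issues : List (List (String × String))) (files : List String) : Prop :=
  ∀ i ∈ issues, "type" ∈ i.map Prod.fst
instance (issues : List (List (String × String))) (files : List String) : Decidable (Pre_extract_strengths_py issues files) := by unfold Pre_extract_strengths_py; infer_instance

def pvWitness_extract_strengths_py : (List (List (String × String))) × List String :=
  ([[("type", "SyntaxError")]], ["a.py"])

def Spec_extract_strengths_py (issues : List (List (String × String))) (files : List String) (out : List String) : Prop := out = extract_strengths_py_alt issues files
instance (issues : List (List (String × String))) (files : List String) (out : List String) : Decidable (Spec_extract_strengths_py issues files out) := by unfold Spec_extract_strengths_py; infer_instance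

-- ===== CLAIM (what is proved, stated in full; the proofs are below) =====
def Claim_equal_extract_strengths_py : Prop := ∀ (issues : List (List (String × String))) (files : List String), Dom_extract_strengths_py issues files → Pre_extract_strengths_py issues files → Spec_extract_strengths_py issues files (extract_strengths_py issues files)

-- ===== LEMMAS AND PROOFS =====

-- the lookup-then-compare step equals A's any()-predicate, for nonempty names
theorem pv_step_eq (i : List (String × String)) (s : String) (hs : s ≠ "") :
    ((List.lookup "type" i).getD "" == s) = (List.lookup "type" i == some s) := by
  cases h : List.lookup "type" i with
  | none => simp [Option.getD, (by simpa using Ne.symm hs : ("" == s) = false)]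
  | some t => simp

-- B's one-pass fold computes exactly A's two any()-scans
theorem pv_foldl_flags (issues : List (List (String × String))) (a b : Bool) :
    issues.foldl (fun (p : Bool × Bool) i =>
        let t := (List.lookup "type" i).getD ""
        (p.1 || t == "SecurityIssue", p.2 || t == "SyntaxError")) (a, b)
      = (a || issues.any (fun i => List.lookup "type" i == some "SecurityIssue"),
         b || issues.any (fun i => List.lookup "type" i == some "SyntaxError")) := by
  induction issues generalizing a b with
  | nil => simp
  | cons i rest ih =>
    simp only [List.foldl_cons, List.any_cons, ih,
      pv_step_eq i "SecurityIssue" (by decide), pv_step_eq i "SyntaxError" (by decide)]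
    simp [Bool.or_assoc]

-- ===== VERDICT (by name: the statement is the Claim_ definition above) =====
theorem extract_strengths_py_spec : Claim_equal_extract_strengths_py := by
  intro issues files _ _
  unfold Spec_extract_strengths_py extract_strengths_py extract_strengths_py_alt
  simp only [pv_foldl_flags issues false false, Bool.false_or]
  by_cases h1 : issues.length < 10 <;>
    by_cases h2 : (issues.any fun i => List.lookup "type" i == some "SecurityIssue") = true <;>
    by_cases h3 : (issues.any fun i => List.lookup "type" i == some "SyntaxError") = true <;>
    by_cases h4 : files.length > 5 <;>
    simp only [h1, h2, h3, h4] <;> decide
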